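-- pv_equiv track=rewrite | github.com/gcharris/writers-factory-app | backend/services/prompt_assembler.py | _compress_identity
-- ===== SOURCE A (Python) =====
-- def _compress_identity(identity: str) -> str:
--     """Compress identity for minimal tier."""
--     # Extract first section (core identity)
--     lines = identity.split('\n')
--     compressed = []
--     in_core = False
--
--     for line in lines[:50]:  # First 50 lines max
--         if '## Core Identity' in line or '# THE ' in line:
--             in_core = True
--         if in_core:
--             compressed.append(line)
--         if in_core and line.startswith('## ') and 'Core Identity' not in line:
--             break
--
--     if compressed:
--         return '\n'.join(compressed)
--
--     # Fallback: first 500 characters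
--     return identity[:500] + "\n\n[Identity compressed for context limits]"
-- ===== SOURCE B (Python) =====
-- def _compress_identity(identity: str) -> str:
--     """Compress identity for minimal tier."""
--     window = identity.split('\n')[:50]
--     # Stage 1: group the window into sections, each section ending at (and
--     # including) a '## ' header line that is not a Core Identity header.
--     sections, cur = [], []
--     for line in window:
--         cur.append(line)
--         if line.startswith('## ') and 'Core Identity' not in line:
--             sections.append(cur)
--             cur = []
--     if cur:
--         sections.append(cur)
--     # Stage 2: in the first section containing a core marker, emit from the
--     # marker line to the section's end.
--     for sec in sections:
--         for k, line in enumerate(sec):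
--             if '## Core Identity' in line or '# THE ' in line:
--                 return '\n'.join(sec[k:])
--     # Fallback: first 500 characters
--     return identity[:500] + "\n\n[Identity compressed for context limits]"
-- ===== Notes on version B (the rewrite author's own statement) =====
-- stated objective: alternative
-- what changed: Replaces A's single stateful loop (in_core flag plus break) by a two-stage pipeline: first group the 50-line window into header-terminated sections (an intermediate list of sections), then search the sections for the first core marker and emit from the marker to that section's end.
import Mathlib
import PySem

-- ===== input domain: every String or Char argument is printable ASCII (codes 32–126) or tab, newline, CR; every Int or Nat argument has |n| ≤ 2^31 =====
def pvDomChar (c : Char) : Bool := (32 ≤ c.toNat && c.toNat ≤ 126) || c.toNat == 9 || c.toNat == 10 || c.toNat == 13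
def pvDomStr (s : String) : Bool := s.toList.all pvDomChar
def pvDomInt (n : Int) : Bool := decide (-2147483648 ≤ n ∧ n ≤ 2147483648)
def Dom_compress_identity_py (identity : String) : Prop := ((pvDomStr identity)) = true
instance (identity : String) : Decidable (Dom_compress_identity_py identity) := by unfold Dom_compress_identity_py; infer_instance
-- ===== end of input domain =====

-- B replaces A's single flagged loop by a two-stage pipeline: group the 50-line window
-- into header-terminated sections, then search the sections for the marker (objective: simpler).

-- ===== PORT A =====
-- A's for-loop with the in_core flag and break, as structural recursion over the lines
def pvLoopA (ls : List String) (in_core : Bool) : List String :=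
  match ls with
  | [] => []
  | l :: rest =>
    let ic := in_core || (PySem.Str.isIn "## Core Identity" l || PySem.Str.isIn "# THE " l)
    if ic then
      l :: (if PySem.Str.startswith l "## " && !PySem.Str.isIn "Core Identity" l
            then [] else pvLoopA rest ic)
    else pvLoopA rest ic

def compress_identity_py (identity : String) : String :=
  let lines := (PySem.Str.split? identity "\n").getD []
  let compressed := pvLoopA (PySem.List.slice lines none (some 50)) false
  if compressed ≠ [] then PySem.Str.join "\n" compressed
  else PySem.Str.slice identity none (some 500) ++ "\n\n[Identity compressed for context limits]"

-- ===== PORT B =====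
-- marker / terminator predicates of B
def pvM (l : String) : Bool := PySem.Str.isIn "## Core Identity" l || PySem.Str.isIn "# THE " l
def pvT (l : String) : Bool := PySem.Str.startswith l "## " && !PySem.Str.isIn "Core Identity" l

-- one step of B's grouping loop: append the line to the current section, flush on a terminator
def pvStep (p : List (List String) × List String) (line : String) :
    List (List String) × List String :=
  let cur := p.2 ++ [line]
  if pvT line then (p.1 ++ [cur], []) else (p.1, cur)

-- B's inner enumerate loop: from the first marker line of a section to its end
def pvFindInSec : List String → Option (List String)
  | [] => none
  | l :: rest => if pvM l then some (l :: rest) else pvFindInSec rest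

-- B's outer loop over the sections
def pvSearch : List (List String) → Option (List String)
  | [] => none
  | sec :: rest =>
    match pvFindInSec sec with
    | some r => some r
    | none => pvSearch rest

def compress_identity_py_alt (identity : String) : String :=
  let window := PySem.List.slice ((PySem.Str.split? identity "\n").getD []) none (some 50)
  let st := window.foldl pvStep (([] : List (List String)), ([] : List String))
  let sections := if st.2 ≠ [] then st.1 ++ [st.2] else st.1
  match pvSearch sections with
  | some r => PySem.Str.join "\n" r
  | none => PySem.Str.slice identity none (some 500) ++ "\n\n[Identity compressed for context limits]"

-- ===== PRECONDITION & SPEC =====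
def Spec_compress_identity_py (identity : String) (out : String) : Prop := out = compress_identity_py_alt identity
instance (identity : String) (out : String) : Decidable (Spec_compress_identity_py identity out) := by unfold Spec_compress_identity_py; infer_instance

-- ===== CLAIM (what is proved, stated in full; the proofs are below) =====
def Claim_equal_compress_identity_py : Prop := ∀ (identity : String), Dom_compress_identity_py identity → Spec_compress_identity_py identity (compress_identity_py identity)

-- ===== LEMMAS AND PROOFS =====

-- prefix of a line list up to and including its first terminator (all of it if none)
def pvTakeIncl (ls : List String) : List String :=
  match ls with
  | [] => []
  | l :: rest => l :: (if pvT l then [] else pvTakeIncl rest)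

-- recursive characterisation of B's grouping loop
def pvSecR : List String → List (List String)
  | [] => []
  | l :: rest =>
    if pvT l then [l] :: pvSecR rest
    else match pvSecR rest with
         | [] => [[l]]
         | s :: ss => (l :: s) :: ss

def pvPrep (cur : List String) : List (List String) → List (List String)
  | [] => if cur = [] then [] else [cur]
  | s :: ss => (cur ++ s) :: ss

theorem pvPrep_nil (ss : List (List String)) : pvPrep [] ss = ss := by
  cases ss <;> simp [pvPrep]

theorem pvFold (ls : List String) : ∀ (secs : List (List String)) (cur : List String),
    (let st := ls.foldl pvStep (secs, cur);
     if st.2 ≠ [] then st.1 ++ [st.2] else st.1) = secs ++ pvPrep cur (pvSecR ls) := by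
  induction ls with
  | nil =>
    intro secs cur
    by_cases h : cur = [] <;> simp [pvPrep, pvSecR, h]
  | cons l rest ih =>
    intro secs cur
    simp only [List.foldl_cons]
    by_cases h : pvT l
    · rw [show pvStep (secs, cur) l = (secs ++ [cur ++ [l]], []) from by simp [pvStep, h]]
      rw [ih, pvPrep_nil, pvSecR, if_pos h]
      simp [pvPrep]
    · rw [show pvStep (secs, cur) l = (secs, cur ++ [l]) from by simp [pvStep, h]]
      rw [ih, pvSecR, if_neg h]
      rcases hs : pvSecR rest with _ | ⟨s, ss⟩
      · simp [pvPrep]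
      · simp [pvPrep]

theorem pvSecR_ne_nil (ls : List String) (h : ls ≠ []) : pvSecR ls ≠ [] := by
  cases ls with
  | nil => exact absurd rfl h
  | cons l rest =>
    simp only [pvSecR]
    split
    · simp
    · rcases hs : pvSecR rest with _ | ⟨s, ss⟩ <;> simp

-- the first section is exactly the prefix through the first terminator
theorem pvHead (ls : List String) :
    (match pvSecR ls with | [] => [] | s :: _ => s) = pvTakeIncl ls := by
  induction ls with
  | nil => rfl
  | cons l rest ih =>
    simp only [pvSecR, pvTakeIncl]
    by_cases h : pvT l
    · simp [h]
    · rw [if_neg h, if_neg h]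
      rcases hs : pvSecR rest with _ | ⟨s, ss⟩
      · have : rest = [] := by
          by_contra hne
          exact pvSecR_ne_nil rest hne hs
        subst this
        rfl
      · rw [hs] at ih
        simpa using congrArg (l :: ·) ih

-- A's loop once the flag is set
theorem pvLoopA_true (ls : List String) : pvLoopA ls true = pvTakeIncl ls := by
  induction ls with
  | nil => rfl
  | cons l rest ih => simp [pvLoopA, pvTakeIncl, pvT, ih]

-- main correspondence: B's staged search over sections computes A's loop result
theorem pvMain (ls : List String) :
    pvSearch (pvSecR ls) =
      (if pvLoopA ls false = [] then none else some (pvLoopA ls false)) := by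
  induction ls with
  | nil => rfl
  | cons l rest ih =>
    have hloop : pvLoopA (l :: rest) false =
        (if pvM l then l :: (if pvT l then [] else pvTakeIncl rest)
         else pvLoopA rest false) := by
      simp only [pvLoopA, Bool.false_or]
      rw [show (PySem.Str.isIn "## Core Identity" l || PySem.Str.isIn "# THE " l) = pvM l from rfl,
        show (PySem.Str.startswith l "## " && !PySem.Str.isIn "Core Identity" l) = pvT l from rfl]
      by_cases hM : pvM l <;> simp [hM, pvLoopA_true]
    by_cases hT : pvT l
    · rw [show pvSecR (l :: rest) = [l] :: pvSecR rest from by simp [pvSecR, hT]]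
      by_cases hM : pvM l
      · rw [show pvSearch ([l] :: pvSecR rest) = some [l] from by
          simp [pvSearch, pvFindInSec, hM]]
        rw [hloop, if_pos hM, if_pos hT]
        simp
      · rw [show pvSearch ([l] :: pvSecR rest) = pvSearch (pvSecR rest) from by
          simp [pvSearch, pvFindInSec, hM]]
        rw [hloop, if_neg hM, ih]
    · rcases hs : pvSecR rest with _ | ⟨s, ss⟩
      · have hrest : rest = [] := by
          by_contra hne
          exact pvSecR_ne_nil rest hne hs
        subst hrest
        rw [show pvSecR [l] = [[l]] from by simp [pvSecR, hT]]
        by_cases hM : pvM l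
        · rw [show pvSearch [[l]] = some [l] from by simp [pvSearch, pvFindInSec, hM]]
          rw [hloop, if_pos hM, if_neg hT]
          simp [pvTakeIncl]
        · rw [show pvSearch [[l]] = none from by simp [pvSearch, pvFindInSec, hM]]
          rw [hloop, if_neg hM]
          rfl
      · rw [show pvSecR (l :: rest) = (l :: s) :: ss from by simp [pvSecR, hT, hs]]
        have hhead : s = pvTakeIncl rest := by
          have := pvHead rest
          rw [hs] at this
          simpa using this
        by_cases hM : pvM l
        · rw [show pvSearch ((l :: s) :: ss) = some (l :: s) from by
            simp [pvSearch, pvFindInSec, hM]]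
          rw [hloop, if_pos hM, if_neg hT, hhead]
          simp
        · rw [show pvSearch ((l :: s) :: ss) = pvSearch (s :: ss) from by
            simp [pvSearch, pvFindInSec, hM]]
          rw [hloop, if_neg hM, ← hs, ih]

-- ===== VERDICT (by name: the statement is the Claim_ definition above) =====
theorem compress_identity_py_spec : Claim_equal_compress_identity_py := by
  intro identity _
  unfold Spec_compress_identity_py compress_identity_py compress_identity_py_alt
  dsimp only
  set window := PySem.List.slice ((PySem.Str.split? identity "\n").getD []) none (some 50) with hw
  have hfold := pvFold window [] []
  simp only [pvPrep_nil, List.nil_append] at hfold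
  rw [show (if (window.foldl pvStep ([], [])).2 ≠ [] then
        (window.foldl pvStep ([], [])).1 ++ [(window.foldl pvStep ([], [])).2]
      else (window.foldl pvStep ([], [])).1) = pvSecR window from hfold]
  rw [pvMain window]
  by_cases h : pvLoopA window false = []
  · rw [if_neg (by simp [h]), if_pos h]
  · rw [if_pos h, if_neg h]
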